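-- pv_equiv track=rewrite | github.com/HidenLee/BaekjoonHub | 프로그래머스/2/250136. ［PCCP 기출문제］ 2번 ／ 석유 시추/［PCCP 기출문제］ 2번 ／ 석유 시추.py | solution
-- ===== SOURCE A (Python) =====
-- def solution(land):
--     n = len(land)
--     m = len(land[0])
--     answer = [0 for _ in range(m)]
--     visit = [[False for _ in range(m)] for _ in range(n)]
--     flag = 0
--
--     delta = [[1,0],[0,1],[-1,0],[0,-1]]
--
--     for i in range(n):
--         for j in range(m):
--             if land[i][j] == 1 and not visit[i][j]:
--                 xset = set()
--                 count = 0
--                 stack = [(i,j)]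
--                 visit[i][j] = True
--                 while stack:
--                     oy, ox = stack.pop()
--                     xset.add(ox)
--                     count += 1
--                     for ny, nx in [(oy+dy,ox+dx) for dy,dx in delta if 0<=oy+dy<n and 0<=ox+dx<m]:
--                         if land[ny][nx] == 1 and not visit[ny][nx]:
--                             visit[ny][nx] = True
--                             stack.append((ny,nx))
--                 for x in xset:
--                     answer[x] += count
--
--     return max(answer)
-- ===== SOURCE B (Python) =====
-- def solution(land):
--     n = len(land)
--     m = len(land[0])
--     best = 0
--     for col in range(m):
--         # multi-source flood from every oil cell in this column;
--         # the number of cells reached is exactly this column's haul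
--         seen = set()
--         stack = []
--         for i in range(n):
--             if land[i][col] == 1:
--                 seen.add((i, col))
--                 stack.append((i, col))
--         while stack:
--             i, j = stack.pop()
--             for q in ((i + 1, j), (i, j + 1), (i - 1, j), (i, j - 1)):
--                 if 0 <= q[0] < n and 0 <= q[1] < m and land[q[0]][q[1]] == 1 and q not in seen:
--                     seen.add(q)
--                     stack.append(q)
--         best = max(best, len(seen))
--     return best
-- ===== Notes on version B (the rewrite author's own statement) =====
-- stated objective: alternative
-- what changed: Instead of one global flood fill that labels each connected component once and adds its size to every column it touches, B runs an independent multi-source flood per column, seeded from that column's oil cells, and the answer for the column is simply the number of cells reached; no visited matrix persists across components and no per-component column-set/size bookkeeping exists.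
import Mathlib
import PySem

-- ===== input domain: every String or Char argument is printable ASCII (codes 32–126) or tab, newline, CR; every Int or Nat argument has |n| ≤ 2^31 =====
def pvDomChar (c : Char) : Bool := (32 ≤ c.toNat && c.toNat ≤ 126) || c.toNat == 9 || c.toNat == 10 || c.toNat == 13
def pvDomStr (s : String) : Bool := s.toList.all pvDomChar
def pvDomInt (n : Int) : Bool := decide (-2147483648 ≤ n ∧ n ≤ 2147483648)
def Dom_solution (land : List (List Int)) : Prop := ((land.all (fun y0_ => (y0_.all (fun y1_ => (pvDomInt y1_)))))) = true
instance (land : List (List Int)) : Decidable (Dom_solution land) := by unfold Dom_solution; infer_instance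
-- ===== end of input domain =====

-- B replaces A's single flood fill with per-component column bookkeeping by an
-- independent per-column multi-source flood whose reach count is that column's haul
-- (alternative algorithm of similar size; not faster).


-- ===== PORT A =====
-- cell value land[i][j]; exact wherever 0 ≤ i < len(land) and 0 ≤ j < len(land[i])
def pvVal (land : List (List Int)) (c : Int × Int) : Int :=
  (PySem.List.pyGet? ((PySem.List.pyGet? land c.1).getD []) c.2).getD 0

-- the grid cells, used only for the termination measure of the two flood loops
def pvCellsL (n m : Int) : List (Int × Int) :=
  (PySem.List.pyRange 0 n).flatMap (fun i => (PySem.List.pyRange 0 m).map (fun j => (i, j)))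

def pvFree (n m : Int) (v : PySem.Set (Int × Int)) : Nat :=
  ((pvCellsL n m).filter (fun c => c ∉ v)).length

theorem pvCellsL_mem (n m : Int) (c : Int × Int) :
    c ∈ pvCellsL n m ↔ 0 ≤ c.1 ∧ c.1 < n ∧ 0 ≤ c.2 ∧ c.2 < m := by
  obtain ⟨a, b⟩ := c
  simp [pvCellsL, List.mem_flatMap, PySem.List.mem_pyRange_one]
  tauto

theorem pvCellsL_nodup (n m : Int) : (pvCellsL n m).Nodup :=
  List.Nodup.product (PySem.List.nodup_pyRange_one 0 n) (PySem.List.nodup_pyRange_one 0 m)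

theorem pvFilter_notMem_append (L : List (Int × Int)) (hL : L.Nodup)
    (v : List (Int × Int)) (q : Int × Int) (hq : q ∈ L) (hv : q ∉ v) :
    (L.filter (fun c => c ∉ v ++ [q])).length + 1 = (L.filter (fun c => c ∉ v)).length := by
  induction L with
  | nil => cases hq
  | cons a t ih =>
    simp only [List.nodup_cons] at hL
    simp only [List.filter_cons]
    rcases List.mem_cons.1 hq with h | h
    · subst h
      have hrest : List.filter (fun c => decide (c ∉ v ++ [q])) t
          = List.filter (fun c => decide (c ∉ v)) t := by
        apply List.filter_congr
        intro c hc
        have hne : c ≠ q := fun e => hL.1 (e ▸ hc)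
        simp [List.mem_append, hne]
      have h1 : decide (q ∉ v ++ [q]) = false := by simp
      have h2 : decide (q ∉ v) = true := by simp [hv]
      rw [h1, h2, hrest]
      simp
    · have haq : a ≠ q := fun e => hL.1 (e ▸ h)
      have ihr := ih hL.2 h
      by_cases ha : a ∈ v
      · have h1 : decide (a ∉ v ++ [q]) = false := by simp [ha]
        have h2 : decide (a ∉ v) = false := by simp [ha]
        rw [h1, h2]
        simpa using ihr
      · have h1 : decide (a ∉ v ++ [q]) = true := by simp [ha, haq]
        have h2 : decide (a ∉ v) = true := by simp [ha]
        rw [h1, h2, if_pos rfl, if_pos rfl]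
        simp only [List.length_cons]
        omega

theorem pvFree_add (n m : Int) (v : PySem.Set (Int × Int)) (q : Int × Int)
    (hq : q ∈ pvCellsL n m) (hv : q ∉ v) :
    pvFree n m (PySem.Set.add v q) + 1 = pvFree n m v := by
  rw [PySem.Set.add_of_not_mem hv]
  exact pvFilter_notMem_append _ (pvCellsL_nodup n m) v q hq hv

-- measure fact shared by the two ports' push loops (cited by their decreasing_by)
theorem pvPush_measure {P : Int × Int → Prop} [DecidablePred P] (n m : Int)
    (f : PySem.Set (Int × Int) × List (Int × Int) → Int × Int → PySem.Set (Int × Int) × List (Int × Int))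
    (hf : ∀ vs q, f vs q = if P q ∧ q ∉ vs.1 then (PySem.Set.add vs.1 q, q :: vs.2) else vs)
    (nbrs : List (Int × Int)) (hc : ∀ q ∈ nbrs, P q → q ∈ pvCellsL n m) :
    ∀ vs, (nbrs.foldl f vs).2.length + pvFree n m (nbrs.foldl f vs).1
            = vs.2.length + pvFree n m vs.1 := by
  induction nbrs with
  | nil => intro vs; rfl
  | cons q t ih =>
    intro vs
    have hc' : ∀ r ∈ t, P r → r ∈ pvCellsL n m := fun r hr => hc r (List.mem_cons_of_mem _ hr)
    simp only [List.foldl_cons, hf]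
    split_ifs with hcond
    · have := pvFree_add n m vs.1 q (hc q List.mem_cons_self hcond.1) hcond.2
      have := ih hc' (PySem.Set.add vs.1 q, q :: vs.2)
      simp only [List.length_cons] at *
      omega
    · exact ih hc' vs

-- A's neighbour list `[(oy+dy,ox+dx) for dy,dx in delta if 0<=oy+dy<n and 0<=ox+dx<m]`
def pvNbrsA (n m : Int) (c : Int × Int) : List (Int × Int) :=
  (([((1:Int),(0:Int)),(0,1),(-1,0),(0,-1)]).map (fun d => (c.1 + d.1, c.2 + d.2))).filter
    (fun q => decide (0 ≤ q.1 ∧ q.1 < n ∧ 0 ≤ q.2 ∧ q.2 < m))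

-- body of A's inner `for ny,nx in …` loop (stack kept top-at-head)
def pvPushA (land : List (List Int)) (vs : PySem.Set (Int × Int) × List (Int × Int))
    (q : Int × Int) : PySem.Set (Int × Int) × List (Int × Int) :=
  if pvVal land q = 1 ∧ q ∉ vs.1 then (PySem.Set.add vs.1 q, q :: vs.2) else vs

-- A's `while stack:` loop; state (stack, visit, xset, count); stack top at head
def pvAflood (land : List (List Int)) (n m : Int) (stack : List (Int × Int))
    (visit : PySem.Set (Int × Int)) (xset : PySem.Set Int) (count : Int) :
    PySem.Set (Int × Int) × PySem.Set Int × Int :=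
  match stack with
  | [] => (visit, xset, count)
  | c :: rest =>
    let vs := (pvNbrsA n m c).foldl (pvPushA land) (visit, rest)
    pvAflood land n m vs.2 vs.1 (PySem.Set.add xset c.2) (count + 1)
termination_by stack.length + pvFree n m visit
decreasing_by
  have h := pvPush_measure (P := fun q => pvVal land q = 1) n m (pvPushA land)
      (fun vs q => rfl) (pvNbrsA n m c)
      (by intro q hq _
          have := List.of_mem_filter hq
          simp only [decide_eq_true_eq] at this
          exact (pvCellsL_mem n m q).2 this)
      (visit, rest)
  simp only [List.length_cons] at *
  omega

-- `for x in xset: answer[x] += count` (iteration order of the set is irrelevant here)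
def pvAddCount (answer : List Int) (xs : List Int) (cnt : Int) : List Int :=
  xs.foldl (fun a x => a.set x.toNat (a.getD x.toNat 0 + cnt)) answer
  -- x.toNat exact: every x put into xset is a column index, 0 ≤ x < m

def solution (land : List (List Int)) : Int :=
  let n : Int := land.length
  let m : Int := (land.headD []).length
  let fin := (PySem.List.pyRange 0 n).foldl (fun st i =>
      (PySem.List.pyRange 0 m).foldl (fun (st : List Int × PySem.Set (Int × Int)) j =>
        if pvVal land (i, j) = 1 ∧ (i, j) ∉ st.2 then
          let res := pvAflood land n m [(i, j)] (PySem.Set.add st.2 (i, j)) PySem.Set.empty 0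
          (pvAddCount st.1 res.2.1 res.2.2, res.1)
        else st) st)
    (List.replicate m.toNat 0, PySem.Set.empty)
  (PySem.List.max? fin.1 (fun x => x)).getD 0   -- max(answer); nonempty under Pre_

-- ===== PORT B =====
-- B's neighbour tuple ((i+1,j),(i,j+1),(i-1,j),(i,j-1))
def pvNbrsB (c : Int × Int) : List (Int × Int) :=
  [(c.1 + 1, c.2), (c.1, c.2 + 1), (c.1 - 1, c.2), (c.1, c.2 - 1)]

-- body of B's inner neighbour loop (guard in the Python order)
def pvStepB (land : List (List Int)) (n m : Int)
    (vs : PySem.Set (Int × Int) × List (Int × Int)) (q : Int × Int) :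
    PySem.Set (Int × Int) × List (Int × Int) :=
  if (0 ≤ q.1 ∧ q.1 < n ∧ 0 ≤ q.2 ∧ q.2 < m ∧ pvVal land q = 1) ∧ q ∉ vs.1
  then (PySem.Set.add vs.1 q, q :: vs.2) else vs

-- B's `while stack:` loop; state (stack, seen); stack top at head
def pvBflood (land : List (List Int)) (n m : Int) (stack : List (Int × Int))
    (seen : PySem.Set (Int × Int)) : PySem.Set (Int × Int) :=
  match stack with
  | [] => seen
  | c :: rest =>
    let vs := (pvNbrsB c).foldl (pvStepB land n m) (seen, rest)
    pvBflood land n m vs.2 vs.1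
termination_by stack.length + pvFree n m seen
decreasing_by
  have h := pvPush_measure (P := fun q => 0 ≤ q.1 ∧ q.1 < n ∧ 0 ≤ q.2 ∧ q.2 < m ∧ pvVal land q = 1)
      n m (pvStepB land n m) (fun vs q => rfl) (pvNbrsB c)
      (by intro q _ hq2
          exact (pvCellsL_mem n m q).2 ⟨hq2.1, hq2.2.1, hq2.2.2.1, hq2.2.2.2.1⟩)
      (seen, rest)
  simp only [List.length_cons] at *
  omega

def solution_alt (land : List (List Int)) : Int :=
  let n : Int := land.length
  let m : Int := (land.headD []).length
  (PySem.List.pyRange 0 m).foldl (fun best col =>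
    let init := (PySem.List.pyRange 0 n).foldl
        (fun (st : PySem.Set (Int × Int) × List (Int × Int)) i =>
          if pvVal land (i, col) = 1 then (PySem.Set.add st.1 (i, col), (i, col) :: st.2) else st)
        (PySem.Set.empty, [])
    let seen := pvBflood land n m init.2 init.1
    max best (seen.length : Int)) 0

-- ===== PRECONDITION & SPEC =====
-- Pre_ excludes exactly the inputs where the Python A raises: an empty grid
-- (IndexError on land[0]), a zero-width first row (max of an empty list), and a
-- row shorter than the first row (IndexError on land[i][j]).
def Pre_solution (land : List (List Int)) : Prop :=
  land ≠ [] ∧ 0 < (land.headD []).length ∧ ∀ r ∈ land, (land.headD []).length ≤ r.length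
instance (land : List (List Int)) : Decidable (Pre_solution land) := by
  unfold Pre_solution; infer_instance

def pvWitness_solution : List (List Int) := [[1, 0], [0, 1]]

def Spec_solution (land : List (List Int)) (out : Int) : Prop := out = solution_alt land
instance (land : List (List Int)) (out : Int) : Decidable (Spec_solution land out) := by
  unfold Spec_solution; infer_instance

-- ===== CLAIM (what is proved, stated in full; the proofs are below) =====
def Claim_equal_solution : Prop :=
  ∀ (land : List (List Int)), Dom_solution land → Pre_solution land →
    Spec_solution land (solution land)

-- ===== LEMMAS AND PROOFS =====

-- a cell inside the grid holding oil
def PVGood (land : List (List Int)) (c : Int × Int) : Prop :=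
  0 ≤ c.1 ∧ c.1 < (land.length : Int) ∧ 0 ≤ c.2 ∧ c.2 < ((land.headD []).length : Int) ∧
    pvVal land c = 1

-- 4-adjacency between oil cells
def PVAdj (land : List (List Int)) (c d : Int × Int) : Prop :=
  PVGood land c ∧ PVGood land d ∧ (c.1 - d.1).natAbs + (c.2 - d.2).natAbs = 1

-- connectivity
def PVReach (land : List (List Int)) : Int × Int → Int × Int → Prop :=
  Relation.ReflTransGen (PVAdj land)

-- d is connected to some oil cell of column x
def PVColConn (land : List (List Int)) (x : Int) (d : Int × Int) : Prop :=
  ∃ s : Int × Int, s.2 = x ∧ PVGood land s ∧ PVReach land s d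

-- k counts the cells satisfying S
def PVCnt (S : Int × Int → Prop) (k : Int) : Prop :=
  ∃ w : List (Int × Int), w.Nodup ∧ (∀ d, d ∈ w ↔ S d) ∧ k = (w.length : Int)

theorem PVAdj_symm {land : List (List Int)} {c d : Int × Int} (h : PVAdj land c d) :
    PVAdj land d c :=
  ⟨h.2.1, h.1, by have := h.2.2; omega⟩

theorem PVReach_symm {land : List (List Int)} {c d : Int × Int} (h : PVReach land c d) :
    PVReach land d c :=
  Relation.ReflTransGen.symmetric (fun _ _ h => PVAdj_symm h) h

theorem PVCnt_unique {S : Int × Int → Prop} {k k' : Int}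
    (h : PVCnt S k) (h' : PVCnt S k') : k = k' := by
  obtain ⟨w, hw, hmem, hk⟩ := h
  obtain ⟨w', hw', hmem', hk'⟩ := h'
  have : ∀ d, d ∈ w ↔ d ∈ w' := fun d => (hmem d).trans (hmem' d).symm
  rw [hk, hk', List.Perm.length_eq ((List.perm_ext_iff_of_nodup hw hw').2 this)]

theorem PVCnt_congr {S T : Int × Int → Prop} {k : Int} (hST : ∀ d, S d ↔ T d)
    (h : PVCnt S k) : PVCnt T k := by
  obtain ⟨w, hw, hmem, hk⟩ := h
  exact ⟨w, hw, fun d => (hmem d).trans (hST d), hk⟩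

theorem mem_pvNbrsA (n m : Int) (c q : Int × Int) :
    q ∈ pvNbrsA n m c ↔
      ((q = (c.1 + 1, c.2) ∨ q = (c.1, c.2 + 1) ∨ q = (c.1 - 1, c.2) ∨ q = (c.1, c.2 - 1)) ∧
        (0 ≤ q.1 ∧ q.1 < n ∧ 0 ≤ q.2 ∧ q.2 < m)) := by
  simp only [pvNbrsA, List.map_cons, List.map_nil, List.mem_filter, List.mem_cons,
    List.not_mem_nil, or_false, decide_eq_true_eq, add_zero]
  constructor
  · rintro ⟨h | h | h | h, hb⟩ <;> subst h <;> simp_all <;> omega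
  · rintro ⟨h | h | h | h, hb⟩ <;> subst h <;> simp_all <;> omega

-- membership in A's neighbour list is exactly adjacency (for an oil cell c)
theorem pvNbrsA_adj {land : List (List Int)} {c q : Int × Int} (hc : PVGood land c) :
    (q ∈ pvNbrsA (land.length : Int) ((land.headD []).length : Int) c ∧ pvVal land q = 1)
      ↔ PVAdj land c q := by
  rw [mem_pvNbrsA]
  obtain ⟨a, b⟩ := q
  obtain ⟨x, y⟩ := c
  obtain ⟨g1, g2, g3, g4, g5⟩ := hc
  simp only [PVAdj, PVGood, Prod.mk.injEq] at *
  constructor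
  · rintro ⟨⟨hd, hb⟩, hv⟩
    exact ⟨⟨g1, g2, g3, g4, g5⟩, ⟨hb.1, hb.2.1, hb.2.2.1, hb.2.2.2, hv⟩, by omega⟩
  · rintro ⟨-, ⟨h1, h2, h3, h4, hv⟩, hnab⟩
    exact ⟨⟨by omega, h1, h2, h3, h4⟩, hv⟩

theorem pvNbrsB_adj {land : List (List Int)} {c q : Int × Int} (hc : PVGood land c) :
    (q ∈ pvNbrsB c ∧ 0 ≤ q.1 ∧ q.1 < (land.length : Int) ∧ 0 ≤ q.2 ∧
        q.2 < ((land.headD []).length : Int) ∧ pvVal land q = 1)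
      ↔ PVAdj land c q := by
  obtain ⟨a, b⟩ := q
  obtain ⟨x, y⟩ := c
  obtain ⟨g1, g2, g3, g4, g5⟩ := hc
  simp only [pvNbrsB, List.mem_cons, List.not_mem_nil, or_false, PVAdj, PVGood,
    Prod.mk.injEq] at *
  constructor
  · rintro ⟨hd, h1, h2, h3, h4, hv⟩
    exact ⟨⟨g1, g2, g3, g4, g5⟩, ⟨h1, h2, h3, h4, hv⟩, by omega⟩
  · rintro ⟨-, ⟨h1, h2, h3, h4, hv⟩, hnab⟩
    exact ⟨by omega, h1, h2, h3, h4, hv⟩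


theorem pvNbrsA_nodup (n m : Int) (c : Int × Int) : (pvNbrsA n m c).Nodup := by
  apply List.Nodup.filter
  simp [List.nodup_cons, Prod.ext_iff]

theorem pvNbrsB_nodup (c : Int × Int) : (pvNbrsB c).Nodup := by
  simp [pvNbrsB, List.nodup_cons, Prod.ext_iff]
  omega

-- a closed set swallows everything reachable from it
theorem pvClosed_reach {land : List (List Int)} {V : List (Int × Int)}
    (hcl : ∀ a ∈ V, ∀ b, PVAdj land a b → b ∈ V) {s d : Int × Int}
    (hs : s ∈ V) (h : PVReach land s d) : d ∈ V := by
  induction h with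
  | refl => exact hs
  | tail h1 h2 ih => exact hcl _ ih _ h2

-- shared shape of both ports' push loops
theorem pvPushFold_spec {P : Int × Int → Prop} [DecidablePred P]
    (f : PySem.Set (Int × Int) × List (Int × Int) → Int × Int → PySem.Set (Int × Int) × List (Int × Int))
    (hf : ∀ vs q, f vs q = if P q ∧ q ∉ vs.1 then (PySem.Set.add vs.1 q, q :: vs.2) else vs) :
    ∀ (nbrs : List (Int × Int)), nbrs.Nodup → ∀ (visit : PySem.Set (Int × Int)) (st : List (Int × Int)),
      ∃ new : List (Int × Int),
        nbrs.foldl f (visit, st) = (visit ++ new, new.reverse ++ st) ∧ new.Nodup ∧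
        (∀ q, q ∈ new ↔ q ∈ nbrs ∧ P q ∧ q ∉ visit) := by
  intro nbrs hnd
  induction nbrs with
  | nil =>
    intro visit st
    exact ⟨[], by simp, List.nodup_nil, by simp⟩
  | cons q t ih =>
    intro visit st
    simp only [List.nodup_cons] at hnd
    simp only [List.foldl_cons, hf]
    by_cases hq : P q ∧ q ∉ visit
    · rw [if_pos hq]
      have hadd : PySem.Set.add visit q = visit ++ [q] := PySem.Set.add_of_not_mem hq.2
      rw [hadd]
      obtain ⟨new', heq, hnd', hmem'⟩ := ih hnd.2 (visit ++ [q]) (q :: st)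
      refine ⟨q :: new', ?_, ?_, ?_⟩
      · rw [heq]
        simp [List.append_assoc]
      · refine List.nodup_cons.2 ⟨?_, hnd'⟩
        intro hcon
        have := (hmem' q).1 hcon
        simp at this
      · intro r
        rw [List.mem_cons, hmem' r, List.mem_cons]
        constructor
        · rintro (rfl | ⟨hrt, hp, hrv⟩)
          · exact ⟨Or.inl rfl, hq.1, hq.2⟩
          · refine ⟨Or.inr hrt, hp, ?_⟩
            intro hrv'
            exact hrv (by simp [hrv'])
        · rintro ⟨rfl | hrt, hp, hrv⟩
          · exact Or.inl rfl
          · have hrq : r ≠ q := fun e => hnd.1 (e ▸ hrt)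
            exact Or.inr ⟨hrt, hp, by simp [hrv, hrq]⟩
    · rw [if_neg hq]
      obtain ⟨new', heq, hnd', hmem'⟩ := ih hnd.2 visit st
      refine ⟨new', heq, hnd', ?_⟩
      intro r
      rw [hmem' r, List.mem_cons]
      constructor
      · rintro ⟨hrt, hp, hrv⟩
        exact ⟨Or.inr hrt, hp, hrv⟩
      · rintro ⟨rfl | hrt, hp, hrv⟩
        · exact absurd ⟨hp, hrv⟩ hq
        · exact ⟨hrt, hp, hrv⟩

-- master lemma for A's while loop
theorem pvAflood_spec (land : List (List Int)) (n m : Int)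
    (hn : n = (land.length : Int)) (hm : m = ((land.headD []).length : Int)) :
    ∀ (stack : List (Int × Int)) (visit : PySem.Set (Int × Int)) (xset : PySem.Set Int) (count : Int),
      stack.Nodup → (∀ c ∈ stack, c ∈ visit) → visit.Nodup →
      (∀ c ∈ stack, PVGood land c) →
      (∀ a ∈ visit, a ∉ stack → ∀ b, PVAdj land a b → b ∈ visit) →
      ∃ extra : List (Int × Int),
        (pvAflood land n m stack visit xset count).1 = visit ++ extra ∧
        (pvAflood land n m stack visit xset count).2.2 = count + stack.length + extra.length ∧
        (∀ x, x ∈ (pvAflood land n m stack visit xset count).2.1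
            ↔ x ∈ xset ∨ ∃ d, (d ∈ stack ∨ d ∈ extra) ∧ d.2 = x) ∧
        (visit ++ extra).Nodup ∧
        (∀ d ∈ extra, PVGood land d ∧ ∃ s ∈ stack, PVReach land s d) ∧
        (∀ a ∈ visit ++ extra, ∀ b, PVAdj land a b → b ∈ visit ++ extra) := by
  subst hn hm
  intro stack visit xset count
  induction stack, visit, xset, count using pvAflood.induct (land := land)
      (n := (land.length : Int)) (m := ((land.headD []).length : Int)) with
  | case1 visit xset count =>
    intro _ _ _ _ hcl
    refine ⟨[], by simp [pvAflood], by simp [pvAflood], ?_, by simpa using ‹visit.Nodup›, by simp, ?_⟩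
    · intro x
      simp [pvAflood]
    · intro a ha b hadj
      simp only [List.append_nil] at *
      exact hcl a ha (by simp) b hadj
  | case2 visit xset count c rest vs ih =>
    intro hnd hsv hvnd hgood hcl
    obtain ⟨new, heq, hndnew, hmemnew⟩ :=
      pvPushFold_spec (P := fun q => pvVal land q = 1) (pvPushA land) (fun vs q => rfl)
        (pvNbrsA (land.length : Int) ((land.headD []).length : Int) c)
        (pvNbrsA_nodup _ _ c) visit rest
    simp only [List.nodup_cons] at hnd
    have hgc : PVGood land c := hgood c List.mem_cons_self
    have hnewgood : ∀ q ∈ new, PVAdj land c q := by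
      intro q hq
      obtain ⟨h1, h2, h3⟩ := (hmemnew q).1 hq
      exact (pvNbrsA_adj hgc).1 ⟨h1, h2⟩
    have hnewvis : ∀ q ∈ new, q ∉ visit := fun q hq => ((hmemnew q).1 hq).2.2
    have hrestvis : ∀ q ∈ rest, q ∈ visit := fun q hq => hsv q (List.mem_cons_of_mem _ hq)
    -- hypotheses for the recursive state
    have hnd' : (new.reverse ++ rest).Nodup :=
      List.Nodup.append (List.nodup_reverse.2 hndnew) hnd.2
        (List.disjoint_left.2 (fun q hq1 hq2 => hnewvis q (List.mem_reverse.1 hq1) (hrestvis q hq2)))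
    have hsv' : ∀ q ∈ new.reverse ++ rest, q ∈ visit ++ new := by
      intro q hq
      rcases List.mem_append.1 hq with h | h
      · exact List.mem_append.2 (Or.inr (List.mem_reverse.1 h))
      · exact List.mem_append.2 (Or.inl (hrestvis q h))
    have hvnd' : (visit ++ new).Nodup :=
      List.Nodup.append hvnd hndnew (List.disjoint_left.2 (fun q hq1 hq2 => hnewvis q hq2 hq1))
    have hgood' : ∀ q ∈ new.reverse ++ rest, PVGood land q := by
      intro q hq
      rcases List.mem_append.1 hq with h | h
      · exact (hnewgood q (List.mem_reverse.1 h)).2.1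
      · exact hgood q (List.mem_cons_of_mem _ h)
    have hcl' : ∀ a ∈ visit ++ new, a ∉ new.reverse ++ rest → ∀ b, PVAdj land a b → b ∈ visit ++ new := by
      intro a ha hast b hadj
      rcases List.mem_append.1 ha with h | h
      · by_cases hac : a = c
        · subst hac
          have := (pvNbrsA_adj hgc).2 hadj
          by_cases hb : b ∈ visit
          · exact List.mem_append.2 (Or.inl hb)
          · exact List.mem_append.2 (Or.inr ((hmemnew b).2 ⟨this.1, this.2, hb⟩))
        · have : a ∉ rest := fun hr => hast (List.mem_append.2 (Or.inr hr))
          have : a ∉ (c :: rest) := by simp [hac, this]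
          exact List.mem_append.2 (Or.inl (hcl a h this b hadj))
      · exact absurd (List.mem_append.2 (Or.inl (List.mem_reverse.2 h))) hast
    have hvs : vs = (visit ++ new, new.reverse ++ rest) := heq
    rw [hvs] at ih
    have ihres := ih hnd' hsv' hvnd' hgood' hcl'
    obtain ⟨extra', e1, e2, e3, e4, e5, e6⟩ := ihres
    have hunf : pvAflood land (land.length : Int) ((land.headD []).length : Int) (c :: rest) visit xset count
        = pvAflood land (land.length : Int) ((land.headD []).length : Int)
            (new.reverse ++ rest) (visit ++ new) (PySem.Set.add xset c.2) (count + 1) := by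
      rw [pvAflood]
      simp only [heq]
    refine ⟨new ++ extra', ?_, ?_, ?_, ?_, ?_, ?_⟩
    · rw [hunf]
      rw [e1, List.append_assoc]
    · rw [hunf]
      rw [e2]
      simp only [List.length_append, List.length_reverse, List.length_cons]
      push_cast
      ring
    · intro x
      rw [hunf]
      rw [e3 x]
      simp only [PySem.Set.mem_add, List.mem_append, List.mem_reverse, List.mem_cons]
      constructor
      · rintro ((hx | hx) | ⟨d, (hd | hd) | hd, hdx⟩)
        · exact Or.inl hx
        · exact Or.inr ⟨c, Or.inl (Or.inl rfl), hx.symm⟩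
        · exact Or.inr ⟨d, Or.inr (Or.inl hd), hdx⟩
        · exact Or.inr ⟨d, Or.inl (Or.inr hd), hdx⟩
        · exact Or.inr ⟨d, Or.inr (Or.inr hd), hdx⟩
      · rintro (hx | ⟨d, (hd | hd) | (hd | hd), hdx⟩)
        · exact Or.inl (Or.inl hx)
        · exact Or.inl (Or.inr (hdx ▸ hd ▸ rfl))
        · exact Or.inr ⟨d, Or.inl (Or.inr hd), hdx⟩
        · exact Or.inr ⟨d, Or.inl (Or.inl hd), hdx⟩
        · exact Or.inr ⟨d, Or.inr hd, hdx⟩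
    · rw [← List.append_assoc]
      exact e4
    · intro d hd
      rcases List.mem_append.1 hd with h | h
      · exact ⟨(hnewgood d h).2.1, c, List.mem_cons_self,
          Relation.ReflTransGen.single (hnewgood d h)⟩
      · obtain ⟨hg, s, hs, hr⟩ := e5 d h
        rcases List.mem_append.1 hs with h2 | h2
        · exact ⟨hg, c, List.mem_cons_self,
            Relation.ReflTransGen.trans
              (Relation.ReflTransGen.single (hnewgood s (List.mem_reverse.1 h2))) hr⟩
        · exact ⟨hg, s, List.mem_cons_of_mem _ h2, hr⟩
    · rw [← List.append_assoc] at *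
      exact e6

-- master lemma for B's while loop
theorem pvBflood_spec (land : List (List Int)) (n m : Int)
    (hn : n = (land.length : Int)) (hm : m = ((land.headD []).length : Int)) :
    ∀ (stack : List (Int × Int)) (seen : PySem.Set (Int × Int)),
      stack.Nodup → (∀ c ∈ stack, c ∈ seen) → seen.Nodup →
      (∀ c ∈ stack, PVGood land c) →
      (∀ a ∈ seen, a ∉ stack → ∀ b, PVAdj land a b → b ∈ seen) →
      ∃ extra : List (Int × Int),
        pvBflood land n m stack seen = seen ++ extra ∧
        (seen ++ extra).Nodup ∧
        (∀ d ∈ extra, PVGood land d ∧ ∃ s ∈ stack, PVReach land s d) ∧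
        (∀ a ∈ seen ++ extra, ∀ b, PVAdj land a b → b ∈ seen ++ extra) := by
  subst hn hm
  intro stack seen
  induction stack, seen using pvBflood.induct (land := land)
      (n := (land.length : Int)) (m := ((land.headD []).length : Int)) with
  | case1 seen =>
    intro _ _ hvnd _ hcl
    refine ⟨[], by simp [pvBflood], by simpa using hvnd, by simp, ?_⟩
    intro a ha b hadj
    simp only [List.append_nil] at *
    exact hcl a ha (by simp) b hadj
  | case2 seen c rest vs ih =>
    intro hnd hsv hvnd hgood hcl
    obtain ⟨new, heq, hndnew, hmemnew⟩ :=
      pvPushFold_spec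
        (P := fun q => 0 ≤ q.1 ∧ q.1 < (land.length : Int) ∧ 0 ≤ q.2 ∧
          q.2 < ((land.headD []).length : Int) ∧ pvVal land q = 1)
        (pvStepB land (land.length : Int) ((land.headD []).length : Int)) (fun vs q => rfl)
        (pvNbrsB c) (pvNbrsB_nodup c) seen rest
    simp only [List.nodup_cons] at hnd
    have hgc : PVGood land c := hgood c List.mem_cons_self
    have hnewgood : ∀ q ∈ new, PVAdj land c q := by
      intro q hq
      obtain ⟨h1, h2, h3⟩ := (hmemnew q).1 hq
      exact (pvNbrsB_adj hgc).1 ⟨h1, h2.1, h2.2.1, h2.2.2.1, h2.2.2.2.1, h2.2.2.2.2⟩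
    have hnewvis : ∀ q ∈ new, q ∉ seen := fun q hq => ((hmemnew q).1 hq).2.2
    have hrestvis : ∀ q ∈ rest, q ∈ seen := fun q hq => hsv q (List.mem_cons_of_mem _ hq)
    have hnd' : (new.reverse ++ rest).Nodup :=
      List.Nodup.append (List.nodup_reverse.2 hndnew) hnd.2
        (List.disjoint_left.2 (fun q hq1 hq2 => hnewvis q (List.mem_reverse.1 hq1) (hrestvis q hq2)))
    have hsv' : ∀ q ∈ new.reverse ++ rest, q ∈ seen ++ new := by
      intro q hq
      rcases List.mem_append.1 hq with h | h
      · exact List.mem_append.2 (Or.inr (List.mem_reverse.1 h))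
      · exact List.mem_append.2 (Or.inl (hrestvis q h))
    have hvnd' : (seen ++ new).Nodup :=
      List.Nodup.append hvnd hndnew (List.disjoint_left.2 (fun q hq1 hq2 => hnewvis q hq2 hq1))
    have hgood' : ∀ q ∈ new.reverse ++ rest, PVGood land q := by
      intro q hq
      rcases List.mem_append.1 hq with h | h
      · exact (hnewgood q (List.mem_reverse.1 h)).2.1
      · exact hgood q (List.mem_cons_of_mem _ h)
    have hcl' : ∀ a ∈ seen ++ new, a ∉ new.reverse ++ rest → ∀ b, PVAdj land a b → b ∈ seen ++ new := by
      intro a ha hast b hadj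
      rcases List.mem_append.1 ha with h | h
      · by_cases hac : a = c
        · subst hac
          have hb2 := (pvNbrsB_adj hgc).2 hadj
          by_cases hb : b ∈ seen
          · exact List.mem_append.2 (Or.inl hb)
          · exact List.mem_append.2 (Or.inr ((hmemnew b).2
              ⟨hb2.1, ⟨hb2.2.1, hb2.2.2.1, hb2.2.2.2.1, hb2.2.2.2.2.1, hb2.2.2.2.2.2⟩, hb⟩))
        · have h1 : a ∉ rest := fun hr => hast (List.mem_append.2 (Or.inr hr))
          have h2 : a ∉ (c :: rest) := by simp [hac, h1]
          exact List.mem_append.2 (Or.inl (hcl a h h2 b hadj))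
      · exact absurd (List.mem_append.2 (Or.inl (List.mem_reverse.2 h))) hast
    have hvs : vs = (seen ++ new, new.reverse ++ rest) := heq
    rw [hvs] at ih
    obtain ⟨extra', e1, e2, e3, e4⟩ := ih hnd' hsv' hvnd' hgood' hcl'
    have hunf : pvBflood land (land.length : Int) ((land.headD []).length : Int) (c :: rest) seen
        = pvBflood land (land.length : Int) ((land.headD []).length : Int)
            (new.reverse ++ rest) (seen ++ new) := by
      rw [pvBflood]
      simp only [heq]
    refine ⟨new ++ extra', ?_, ?_, ?_, ?_⟩
    · rw [hunf, e1, List.append_assoc]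
    · rw [← List.append_assoc]
      exact e2
    · intro d hd
      rcases List.mem_append.1 hd with h | h
      · exact ⟨(hnewgood d h).2.1, c, List.mem_cons_self,
          Relation.ReflTransGen.single (hnewgood d h)⟩
      · obtain ⟨hg, s, hs, hr⟩ := e3 d h
        rcases List.mem_append.1 hs with h2 | h2
        · exact ⟨hg, c, List.mem_cons_self,
            Relation.ReflTransGen.trans
              (Relation.ReflTransGen.single (hnewgood s (List.mem_reverse.1 h2))) hr⟩
        · exact ⟨hg, s, List.mem_cons_of_mem _ h2, hr⟩
    · rw [← List.append_assoc] at *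
      exact e4

theorem pvAflood_xset_nodup (land : List (List Int)) (n m : Int) :
    ∀ (stack : List (Int × Int)) (visit : PySem.Set (Int × Int)) (xset : PySem.Set Int) (count : Int),
      xset.Nodup → (pvAflood land n m stack visit xset count).2.1.Nodup := by
  intro stack visit xset count
  induction stack, visit, xset, count using pvAflood.induct (land := land) (n := n) (m := m) with
  | case1 visit xset count => intro h; simpa [pvAflood] using h
  | case2 visit xset count c rest vs ih =>
    intro h
    rw [pvAflood]
    exact ih (PySem.Set.nodup_add _ _ h)

theorem pvAddCount_spec (xs : List Int) (hnd : xs.Nodup) :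
    ∀ (answer : List Int) (cnt : Int), (∀ x ∈ xs, 0 ≤ x ∧ x.toNat < answer.length) →
      (pvAddCount answer xs cnt).length = answer.length ∧
      ∀ y : Nat, y < answer.length →
        (pvAddCount answer xs cnt).getD y 0 =
          (if (y : Int) ∈ xs then answer.getD y 0 + cnt else answer.getD y 0) := by
  induction xs with
  | nil =>
    intro answer cnt _
    exact ⟨rfl, fun y _ => by simp [pvAddCount]⟩
  | cons x t ih =>
    intro answer cnt hb
    simp only [List.nodup_cons] at hnd
    have hx := hb x List.mem_cons_self
    have hstep : pvAddCount answer (x :: t) cnt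
        = pvAddCount (answer.set x.toNat (answer.getD x.toNat 0 + cnt)) t cnt := rfl
    have hlen : (answer.set x.toNat (answer.getD x.toNat 0 + cnt)).length = answer.length :=
      List.length_set
    obtain ⟨ihl, ihg⟩ := ih hnd.2 (answer.set x.toNat (answer.getD x.toNat 0 + cnt)) cnt
      (by intro z hz; rw [hlen]; exact hb z (List.mem_cons_of_mem _ hz))
    refine ⟨by rw [hstep, ihl, hlen], ?_⟩
    intro y hy
    rw [hstep, ihg y (hlen ▸ hy)]
    by_cases hyx : y = x.toNat
    · rw [hyx]
      have hyi : ((x.toNat : Nat) : Int) = x := Int.toNat_of_nonneg hx.1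
      rw [if_neg (show ¬ ((x.toNat : Int) ∈ t) by rw [hyi]; exact hnd.1)]
      rw [if_pos (List.mem_cons.2 (Or.inl hyi))]
      simp [List.getD_eq_getElem?_getD, List.getElem?_set_self hx.2]
    · have hne : x.toNat ≠ y := fun e => hyx e.symm
      have hyi : (y : Int) ≠ x := by
        intro e
        exact hyx (by omega)
      have hset : (answer.set x.toNat (answer.getD x.toNat 0 + cnt)).getD y 0 = answer.getD y 0 := by
        simp [List.getD_eq_getElem?_getD, hne]
      rw [hset]
      simp [List.mem_cons, hyi]

-- flooding a fresh component: what A's per-component block computes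
theorem pvComp_spec (land : List (List Int)) (c : Int × Int) (V : PySem.Set (Int × Int))
    (hgc : PVGood land c) (hcV : c ∉ V) (hVnd : V.Nodup)
    (hVcl : ∀ a ∈ V, ∀ b, PVAdj land a b → b ∈ V) :
    ∃ K : List (Int × Int),
      (pvAflood land (land.length : Int) ((land.headD []).length : Int) [c]
          (PySem.Set.add V c) PySem.Set.empty 0).1 = V ++ K ∧
      (V ++ K).Nodup ∧
      (∀ d, d ∈ K ↔ PVReach land c d) ∧
      (∀ d ∈ K, PVGood land d) ∧
      (∀ a ∈ V ++ K, ∀ b, PVAdj land a b → b ∈ V ++ K) ∧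
      (pvAflood land (land.length : Int) ((land.headD []).length : Int) [c]
          (PySem.Set.add V c) PySem.Set.empty 0).2.2 = (K.length : Int) ∧
      (∀ x, x ∈ (pvAflood land (land.length : Int) ((land.headD []).length : Int) [c]
          (PySem.Set.add V c) PySem.Set.empty 0).2.1 ↔ ∃ d ∈ K, d.2 = x) := by
  have hadd : PySem.Set.add V c = V ++ [c] := PySem.Set.add_of_not_mem hcV
  have h1 : ([c] : List (Int × Int)).Nodup := by simp
  have h2 : ∀ q ∈ [c], q ∈ PySem.Set.add V c := by
    intro q hq
    simp only [List.mem_singleton] at hq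
    subst hq
    exact (PySem.Set.mem_add _ _ _).2 (Or.inr rfl)
  have h3 : (PySem.Set.add V c).Nodup := PySem.Set.nodup_add _ _ hVnd
  have h4 : ∀ q ∈ [c], PVGood land q := by
    intro q hq; simp only [List.mem_singleton] at hq; subst hq; exact hgc
  have h5 : ∀ a ∈ PySem.Set.add V c, a ∉ [c] → ∀ b, PVAdj land a b → b ∈ PySem.Set.add V c := by
    intro a ha hac b hadj
    simp only [List.mem_singleton] at hac
    rcases (PySem.Set.mem_add _ _ _).1 ha with h | h
    · exact (PySem.Set.mem_add _ _ _).2 (Or.inl (hVcl a h b hadj))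
    · exact absurd h hac
  obtain ⟨extra, e1, e2, e3, e4, e5, e6⟩ :=
    pvAflood_spec land (land.length : Int) ((land.headD []).length : Int) rfl rfl
      [c] (PySem.Set.add V c) PySem.Set.empty 0 h1 h2 h3 h4 h5
  refine ⟨c :: extra, ?_, ?_, ?_, ?_, ?_, ?_, ?_⟩
  · rw [e1, hadd, List.append_assoc]
    rfl
  · have := e4
    rw [hadd, List.append_assoc] at this
    exact this
  · intro d
    constructor
    · intro hd0
      rcases List.mem_cons.1 hd0 with h | hd
      · exact h ▸ Relation.ReflTransGen.refl
      · obtain ⟨-, s, hs, hr⟩ := e5 d hd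
        simp only [List.mem_singleton] at hs
        exact hs ▸ hr
    · intro hr
      have hdin : d ∈ PySem.Set.add V c ++ extra := by
        have hcin : c ∈ PySem.Set.add V c ++ extra :=
          List.mem_append.2 (Or.inl ((PySem.Set.mem_add _ _ _).2 (Or.inr rfl)))
        exact pvClosed_reach e6 hcin hr
      have hdV : d ∉ V := by
        intro hdV
        exact hcV (pvClosed_reach hVcl hdV (PVReach_symm hr))
      rw [hadd, List.append_assoc] at hdin
      rcases List.mem_append.1 hdin with h | h
      · exact absurd h hdV
      · exact h
  · intro d hd
    rcases List.mem_cons.1 hd with rfl | hd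
    · exact hgc
    · exact (e5 d hd).1
  · have := e6
    rw [hadd, List.append_assoc] at this
    exact this
  · rw [e2]
    simp only [List.length_cons, List.length_nil]
    push_cast
    omega
  · intro x
    rw [e3 x]
    constructor
    · rintro (hx | ⟨d, hd | hd, hdx⟩)
      · simp [PySem.Set.empty] at hx
      · exact ⟨d, List.mem_cons.2 (Or.inl (List.mem_singleton.1 hd)), hdx⟩
      · exact ⟨d, List.mem_cons_of_mem _ hd, hdx⟩
    · rintro ⟨d, hd, hdx⟩
      rcases List.mem_cons.1 hd with h | h
      · exact Or.inr ⟨d, Or.inl (List.mem_singleton.2 h), hdx⟩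
      · exact Or.inr ⟨d, Or.inr h, hdx⟩

-- the body of A's outer scan (identical to the lambda inside `solution`)
def pvAbody (land : List (List Int)) (i : Int) (st : List Int × PySem.Set (Int × Int))
    (j : Int) : List Int × PySem.Set (Int × Int) :=
  if pvVal land (i, j) = 1 ∧ (i, j) ∉ st.2 then
    let res := pvAflood land (land.length : Int) ((land.headD []).length : Int) [(i, j)]
      (PySem.Set.add st.2 (i, j)) PySem.Set.empty 0
    (pvAddCount st.1 res.2.1 res.2.2, res.1)
  else st

-- invariant of A's outer scan
def PVInv (land : List (List Int)) (V : PySem.Set (Int × Int)) (answer : List Int)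
    (pr : List (Int × Int)) : Prop :=
  V.Nodup ∧ (∀ d ∈ V, PVGood land d) ∧ (∀ a ∈ V, ∀ b, PVAdj land a b → b ∈ V) ∧
  (∀ c ∈ pr, PVGood land c → c ∈ V) ∧
  answer.length = (land.headD []).length ∧
  (∀ x : Int, 0 ≤ x → x < ((land.headD []).length : Int) →
    PVCnt (fun d => d ∈ V ∧ PVColConn land x d) (answer.getD x.toNat 0))

theorem pvStep_inv (land : List (List Int)) (i j : Int)
    (hij : 0 ≤ i ∧ i < (land.length : Int) ∧ 0 ≤ j ∧ j < ((land.headD []).length : Int))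
    (st : List Int × PySem.Set (Int × Int)) (pr : List (Int × Int))
    (h : PVInv land st.2 st.1 pr) :
    PVInv land (pvAbody land i st j).2 (pvAbody land i st j).1 (pr ++ [(i, j)]) := by
  obtain ⟨hVnd, hVg, hVcl, hprV, hlen, hcnt⟩ := h
  rw [pvAbody]
  split_ifs with hcond
  · -- a fresh component is flooded
    dsimp only
    have hgc : PVGood land (i, j) := ⟨hij.1, hij.2.1, hij.2.2.1, hij.2.2.2, hcond.1⟩
    obtain ⟨K, k1, k2, k3, k4, k5, k6, k7⟩ := pvComp_spec land (i, j) st.2 hgc hcond.2 hVnd hVcl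
    rw [k1]
    have hdisj : ∀ d ∈ st.2, d ∉ K := by
      intro d hd hdK
      obtain ⟨-, -, hx⟩ := List.nodup_append.1 k2
      exact hx d hd d hdK rfl
    have hxsnd : (pvAflood land (land.length : Int) ((land.headD []).length : Int) [(i, j)]
        (PySem.Set.add st.2 (i, j)) PySem.Set.empty 0).2.1.Nodup :=
      pvAflood_xset_nodup land _ _ _ _ _ _ List.nodup_nil
    have hxsb : ∀ x ∈ (pvAflood land (land.length : Int) ((land.headD []).length : Int) [(i, j)]
        (PySem.Set.add st.2 (i, j)) PySem.Set.empty 0).2.1, 0 ≤ x ∧ x.toNat < st.1.length := by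
      intro x hx
      obtain ⟨d, hdK, hdx⟩ := (k7 x).1 hx
      have := (k4 d hdK).2.2
      rw [hlen]
      omega
    obtain ⟨hal, hag⟩ := pvAddCount_spec _ hxsnd st.1 _ hxsb
    refine ⟨k2, ?_, k5, ?_, by rw [hal, hlen], ?_⟩
    · intro d hd
      rcases List.mem_append.1 hd with hd | hd
      · exact hVg d hd
      · exact k4 d hd
    · intro c hc hgcc
      rcases List.mem_append.1 hc with hc | hc
      · exact List.mem_append.2 (Or.inl (hprV c hc hgcc))
      · simp only [List.mem_singleton] at hc
        subst hc
        exact List.mem_append.2 (Or.inr ((k3 _).2 Relation.ReflTransGen.refl))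
    · intro x hx0 hxm
      have hy : x.toNat < st.1.length := by rw [hlen]; omega
      have hyx : ((x.toNat : Nat) : Int) = x := Int.toNat_of_nonneg hx0
      rw [hag x.toNat hy, hyx]
      obtain ⟨w, hwnd, hwmem, hwlen⟩ := hcnt x hx0 hxm
      by_cases hmem : x ∈ (pvAflood land (land.length : Int) ((land.headD []).length : Int)
          [(i, j)] (PySem.Set.add st.2 (i, j)) PySem.Set.empty 0).2.1
      · rw [if_pos hmem]
        obtain ⟨e, heK, hex⟩ := (k7 x).1 hmem
        refine ⟨w ++ K, ?_, ?_, ?_⟩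
        · refine List.Nodup.append hwnd (List.nodup_append.1 k2).2.1 ?_
          exact List.disjoint_left.2 (fun d hd hdK => hdisj d ((hwmem d).1 hd).1 hdK)
        · intro d
          rw [List.mem_append, hwmem d]
          constructor
          · rintro (⟨hdV, hcc⟩ | hdK)
            · exact ⟨List.mem_append.2 (Or.inl hdV), hcc⟩
            · refine ⟨List.mem_append.2 (Or.inr hdK), e, hex, k4 e heK, ?_⟩
              exact Relation.ReflTransGen.trans (PVReach_symm ((k3 e).1 heK)) ((k3 d).1 hdK)
          · rintro ⟨hd, hcc⟩
            rcases List.mem_append.1 hd with hd | hd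
            · exact Or.inl ⟨hd, hcc⟩
            · exact Or.inr hd
        · rw [hwlen, k6]
          simp [List.length_append]
      · rw [if_neg hmem]
        refine ⟨w, hwnd, ?_, hwlen⟩
        intro d
        rw [hwmem d]
        constructor
        · rintro ⟨hdV, hcc⟩
          exact ⟨List.mem_append.2 (Or.inl hdV), hcc⟩
        · rintro ⟨hd, hcc⟩
          rcases List.mem_append.1 hd with hd | hd
          · exact ⟨hd, hcc⟩
          · exfalso
            obtain ⟨sC, hs2, hsg, hsr⟩ := hcc
            have hsK : sC ∈ K := (k3 sC).2
              (Relation.ReflTransGen.trans ((k3 d).1 hd) (PVReach_symm hsr))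
            exact hmem ((k7 x).2 ⟨sC, hsK, hs2⟩)
  · -- nothing to do at this cell
    refine ⟨hVnd, hVg, hVcl, ?_, hlen, hcnt⟩
    intro c hc hgcc
    rcases List.mem_append.1 hc with hc | hc
    · exact hprV c hc hgcc
    · simp only [List.mem_singleton] at hc
      subst hc
      by_cases hin : (i, j) ∈ st.2
      · exact hin
      · exact absurd ⟨hgcc.2.2.2.2, hin⟩ hcond

theorem pvAfoldInner (land : List (List Int)) (i : Int)
    (hi : 0 ≤ i ∧ i < (land.length : Int)) :
    ∀ (l : List Int), (∀ j ∈ l, 0 ≤ j ∧ j < ((land.headD []).length : Int)) →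
      ∀ (st : List Int × PySem.Set (Int × Int)) (pr : List (Int × Int)),
        PVInv land st.2 st.1 pr →
        PVInv land (l.foldl (pvAbody land i) st).2 (l.foldl (pvAbody land i) st).1
          (pr ++ l.map (fun j => (i, j))) := by
  intro l
  induction l with
  | nil => intro _ st pr h; simpa using h
  | cons j t ih =>
    intro hb st pr h
    have hj := hb j List.mem_cons_self
    have hstep := pvStep_inv land i j ⟨hi.1, hi.2, hj.1, hj.2⟩ st pr h
    have := ih (fun j' hj' => hb j' (List.mem_cons_of_mem _ hj')) (pvAbody land i st j)
      (pr ++ [(i, j)]) hstep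
    simpa [List.append_assoc] using this

theorem pvAfoldOuter (land : List (List Int)) :
    ∀ (li : List Int), (∀ i ∈ li, 0 ≤ i ∧ i < (land.length : Int)) →
      ∀ (st : List Int × PySem.Set (Int × Int)) (pr : List (Int × Int)),
        PVInv land st.2 st.1 pr →
        PVInv land
          ((li.foldl (fun st i =>
              (PySem.List.pyRange 0 ((land.headD []).length : Int)).foldl (pvAbody land i) st) st)).2
          ((li.foldl (fun st i =>
              (PySem.List.pyRange 0 ((land.headD []).length : Int)).foldl (pvAbody land i) st) st)).1
          (pr ++ li.flatMap (fun i =>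
              (PySem.List.pyRange 0 ((land.headD []).length : Int)).map (fun j => (i, j)))) := by
  intro li
  induction li with
  | nil => intro _ st pr h; simpa using h
  | cons i t ih =>
    intro hb st pr h
    have hi := hb i List.mem_cons_self
    have hstep := pvAfoldInner land i hi (PySem.List.pyRange 0 ((land.headD []).length : Int))
      (fun j hj => by
        have := PySem.List.mem_pyRange_one.1 hj
        exact ⟨this.1, this.2⟩) st pr h
    have := ih (fun i' hi' => hb i' (List.mem_cons_of_mem _ hi')) _ _ hstep
    simpa [List.append_assoc] using this

-- characterization of A's final (answer, visit) state
theorem pvA_char (land : List (List Int)) :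
    ((PySem.List.pyRange 0 (land.length : Int)).foldl (fun st i =>
        (PySem.List.pyRange 0 ((land.headD []).length : Int)).foldl (pvAbody land i) st)
      (List.replicate ((land.headD []).length : Int).toNat 0, PySem.Set.empty)).1.length
        = (land.headD []).length ∧
    ∀ x : Int, 0 ≤ x → x < ((land.headD []).length : Int) →
      PVCnt (fun d => PVGood land d ∧ PVColConn land x d)
        (((PySem.List.pyRange 0 (land.length : Int)).foldl (fun st i =>
            (PySem.List.pyRange 0 ((land.headD []).length : Int)).foldl (pvAbody land i) st)
          (List.replicate ((land.headD []).length : Int).toNat 0, PySem.Set.empty)).1.getD x.toNat 0) := by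
  have hinit : PVInv land PySem.Set.empty
      (List.replicate ((land.headD []).length : Int).toNat 0) [] := by
    refine ⟨List.nodup_nil, by simp [PySem.Set.empty], by simp [PySem.Set.empty], by simp, ?_, ?_⟩
    · simp
    · intro x hx0 hxm
      have : (List.replicate ((land.headD []).length : Int).toNat (0 : Int)).getD x.toNat 0 = 0 :=
        List.getD_replicate 0 (by omega)
      rw [this]
      exact ⟨[], List.nodup_nil, by simp [PySem.Set.empty], by simp⟩
  have hmain := pvAfoldOuter land (PySem.List.pyRange 0 (land.length : Int))
    (fun i hi => by
      have := PySem.List.mem_pyRange_one.1 hi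
      exact ⟨this.1, this.2⟩)
    (List.replicate ((land.headD []).length : Int).toNat 0, PySem.Set.empty) [] hinit
  obtain ⟨hVnd, hVg, hVcl, hprV, hlen, hcnt⟩ := hmain
  refine ⟨hlen, ?_⟩
  intro x hx0 hxm
  refine PVCnt_congr ?_ (hcnt x hx0 hxm)
  intro d
  constructor
  · rintro ⟨hdV, hcc⟩
    exact ⟨hVg d hdV, hcc⟩
  · rintro ⟨hgd, hcc⟩
    refine ⟨hprV d ?_ hgd, hcc⟩
    simp only [List.nil_append]
    exact (pvCellsL_mem (land.length : Int) ((land.headD []).length : Int) d).2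
      ⟨hgd.1, hgd.2.1, hgd.2.2.1, hgd.2.2.2.1⟩
  -- pvCellsL is definitionally the flatMap the fold produced
-- B's source-collection loop produces the column's oil cells (stack top at head)
theorem pvBsrc_spec (land : List (List Int)) (col : Int) :
    ∀ (l : List Int), l.Nodup → ∀ (st : PySem.Set (Int × Int) × List (Int × Int)),
      (∀ i ∈ l, (i, col) ∉ st.1) →
      l.foldl (fun st i => if pvVal land (i, col) = 1
          then (PySem.Set.add st.1 (i, col), (i, col) :: st.2) else st) st
        = (st.1 ++ (l.filter (fun i => decide (pvVal land (i, col) = 1))).map (fun i => (i, col)),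
           ((l.filter (fun i => decide (pvVal land (i, col) = 1))).map (fun i => (i, col))).reverse
             ++ st.2) := by
  intro l hnd
  induction l with
  | nil => intro st _; simp
  | cons a t ih =>
    intro st hfresh
    simp only [List.nodup_cons] at hnd
    simp only [List.foldl_cons, List.filter_cons]
    by_cases hv : pvVal land (a, col) = 1
    · rw [if_pos hv]
      have hadd : PySem.Set.add st.1 (a, col) = st.1 ++ [(a, col)] :=
        PySem.Set.add_of_not_mem (hfresh a List.mem_cons_self)
      have hfresh' : ∀ i ∈ t, (i, col) ∉ st.1 ++ [(a, col)] := by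
        intro i hi hmem
        rcases List.mem_append.1 hmem with h | h
        · exact hfresh i (List.mem_cons_of_mem _ hi) h
        · simp only [List.mem_singleton, Prod.mk.injEq] at h
          exact hnd.1 (h.1 ▸ hi)
      have := ih hnd.2 (st.1 ++ [(a, col)], (a, col) :: st.2) hfresh'
      rw [hadd, this]
      simp [hv, List.append_assoc]
    · rw [if_neg hv]
      have := ih hnd.2 st (fun i hi => hfresh i (List.mem_cons_of_mem _ hi))
      rw [this]
      simp [hv]

-- what one iteration of B's per-column loop counts
theorem pvB_col (land : List (List Int)) (col : Int)
    (hcol : 0 ≤ col ∧ col < ((land.headD []).length : Int)) :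
    PVCnt (fun d => PVGood land d ∧ PVColConn land col d)
      ((pvBflood land (land.length : Int) ((land.headD []).length : Int)
        ((PySem.List.pyRange 0 (land.length : Int)).foldl
          (fun (st : PySem.Set (Int × Int) × List (Int × Int)) i =>
            if pvVal land (i, col) = 1
            then (PySem.Set.add st.1 (i, col), (i, col) :: st.2) else st)
          (PySem.Set.empty, [])).2
        ((PySem.List.pyRange 0 (land.length : Int)).foldl
          (fun (st : PySem.Set (Int × Int) × List (Int × Int)) i =>
            if pvVal land (i, col) = 1
            then (PySem.Set.add st.1 (i, col), (i, col) :: st.2) else st)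
          (PySem.Set.empty, [])).1).length : Int) := by
  have hsrc := pvBsrc_spec land col (PySem.List.pyRange 0 (land.length : Int))
    (PySem.List.nodup_pyRange_one 0 _) (PySem.Set.empty, [])
    (fun i _ => by simp [PySem.Set.empty])
  set srcs := ((PySem.List.pyRange 0 (land.length : Int)).filter
      (fun i => decide (pvVal land (i, col) = 1))).map (fun i => (i, col)) with hsrcs
  have hmemsrc : ∀ s : Int × Int, s ∈ srcs ↔ (PVGood land s ∧ s.2 = col) := by
    rintro ⟨a, b⟩
    rw [hsrcs]
    simp only [List.mem_map, List.mem_filter, PySem.List.mem_pyRange_one, decide_eq_true_eq,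
      Prod.mk.injEq, PVGood]
    constructor
    · rintro ⟨i, ⟨⟨hi0, hin⟩, hvi⟩, rfl, rfl⟩
      exact ⟨⟨hi0, hin, hcol.1, hcol.2, hvi⟩, rfl⟩
    · rintro ⟨⟨h1, h2, h3, h4, h5⟩, rfl⟩
      exact ⟨a, ⟨⟨h1, h2⟩, h5⟩, rfl, rfl⟩
  have hsnodup : srcs.Nodup := by
    rw [hsrcs]
    refine List.Nodup.map ?_ ((PySem.List.nodup_pyRange_one 0 _).filter _)
    intro x y h
    simpa using congrArg Prod.fst h
  rw [hsrc]
  simp only [List.append_nil, List.nil_append, PySem.Set.empty]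
  obtain ⟨extra, e1, e2, e3, e4⟩ :=
    pvBflood_spec land (land.length : Int) ((land.headD []).length : Int) rfl rfl
      srcs.reverse srcs (List.nodup_reverse.2 hsnodup)
      (fun c hc => List.mem_reverse.1 hc) hsnodup
      (fun c hc => ((hmemsrc c).1 (List.mem_reverse.1 hc)).1)
      (fun a ha hna => absurd (List.mem_reverse.2 ha) hna)
  rw [e1]
  refine ⟨srcs ++ extra, e2, ?_, rfl⟩
  intro d
  constructor
  · intro hd
    rcases List.mem_append.1 hd with hd | hd
    · obtain ⟨hgd, hc⟩ := (hmemsrc d).1 hd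
      exact ⟨hgd, d, hc, hgd, Relation.ReflTransGen.refl⟩
    · obtain ⟨hgd, sC, hsC, hr⟩ := e3 d hd
      obtain ⟨hgs, hsc⟩ := (hmemsrc sC).1 (List.mem_reverse.1 hsC)
      exact ⟨hgd, sC, hsc, hgs, hr⟩
  · rintro ⟨hgd, sC, hs2, hsg, hsr⟩
    exact pvClosed_reach e4 (List.mem_append.2 (Or.inl ((hmemsrc sC).2 ⟨hsg, hs2⟩))) hsr

theorem pvMaxD (la : List Int) (hne : la ≠ []) (hnn : ∀ v ∈ la, 0 ≤ v) :
    (PySem.List.max? la (fun x => x)).getD 0 = la.foldl max 0 := by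
  cases la with
  | nil => exact absurd rfl hne
  | cons x t =>
    rw [PySem.List.max?_id_cons]
    simp only [Option.getD_some]
    rw [List.foldl_cons, max_eq_right (hnn x List.mem_cons_self)]

theorem pvFoldRange : ∀ (la : List Int) (acc : Int),
    (List.range la.length).foldl (fun b k => max b (la.getD k 0)) acc = la.foldl max acc := by
  intro la
  induction la using List.reverseRecOn with
  | nil => intro acc; simp
  | append_singleton t x ih =>
    intro acc
    rw [List.length_append, List.length_singleton, List.range_succ, List.foldl_append,
      List.foldl_append]
    simp only [List.foldl_cons, List.foldl_nil]
    rw [PySem.List.foldl_congr_mem _ _ (fun b k => max b (t.getD k 0)) acc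
      (fun b k hk => by rw [List.getD_append _ _ _ _ (List.mem_range.1 hk)])]
    rw [ih acc, List.getD_append_right _ _ _ _ le_rfl]
    simp

-- ===== VERDICT (by name: the statement is the Claim_ definition above) =====
theorem solution_spec : Claim_equal_solution := by
  intro land _ hpre
  obtain ⟨hne, hm0, -⟩ := hpre
  unfold Spec_solution
  obtain ⟨hlenA, hcntA⟩ := pvA_char land
  have hAeq : solution land = (PySem.List.max?
      ((PySem.List.pyRange 0 (land.length : Int)).foldl (fun st i =>
        (PySem.List.pyRange 0 ((land.headD []).length : Int)).foldl (pvAbody land i) st)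
      (List.replicate ((land.headD []).length : Int).toNat 0, PySem.Set.empty)).1
      (fun x => x)).getD 0 := rfl
  have hBeq : solution_alt land = (PySem.List.pyRange 0 ((land.headD []).length : Int)).foldl
      (fun best col => max best
        ((pvBflood land (land.length : Int) ((land.headD []).length : Int)
          ((PySem.List.pyRange 0 (land.length : Int)).foldl
            (fun (st : PySem.Set (Int × Int) × List (Int × Int)) i =>
              if pvVal land (i, col) = 1
              then (PySem.Set.add st.1 (i, col), (i, col) :: st.2) else st)
            (PySem.Set.empty, [])).2
          ((PySem.List.pyRange 0 (land.length : Int)).foldl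
            (fun (st : PySem.Set (Int × Int) × List (Int × Int)) i =>
              if pvVal land (i, col) = 1
              then (PySem.Set.add st.1 (i, col), (i, col) :: st.2) else st)
            (PySem.Set.empty, [])).1).length : Int)) 0 := rfl
  set la := ((PySem.List.pyRange 0 (land.length : Int)).foldl (fun st i =>
      (PySem.List.pyRange 0 ((land.headD []).length : Int)).foldl (pvAbody land i) st)
    (List.replicate ((land.headD []).length : Int).toNat 0, PySem.Set.empty)).1 with hla
  have hbody := PySem.List.foldl_congr_mem
    (PySem.List.pyRange 0 ((land.headD []).length : Int))
    (fun best col => max best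
        ((pvBflood land (land.length : Int) ((land.headD []).length : Int)
          ((PySem.List.pyRange 0 (land.length : Int)).foldl
            (fun (st : PySem.Set (Int × Int) × List (Int × Int)) i =>
              if pvVal land (i, col) = 1
              then (PySem.Set.add st.1 (i, col), (i, col) :: st.2) else st)
            (PySem.Set.empty, [])).2
          ((PySem.List.pyRange 0 (land.length : Int)).foldl
            (fun (st : PySem.Set (Int × Int) × List (Int × Int)) i =>
              if pvVal land (i, col) = 1
              then (PySem.Set.add st.1 (i, col), (i, col) :: st.2) else st)
            (PySem.Set.empty, [])).1).length : Int))
    (fun best col => max best (la.getD col.toNat 0)) 0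
    (by
      intro best col hcolmem
      have hcb := PySem.List.mem_pyRange_one.1 hcolmem
      have h1 := pvB_col land col ⟨hcb.1, hcb.2⟩
      have h2 := hcntA col hcb.1 hcb.2
      dsimp only
      rw [PVCnt_unique h1 h2])
  rw [hAeq, hBeq, hbody]
  have hFne : la ≠ [] := by
    intro e
    have h := hlenA
    rw [e] at h
    simp only [List.length_nil] at h
    omega
  have hFnn : ∀ v ∈ la, 0 ≤ v := by
    intro v hv
    obtain ⟨k, hk, he⟩ := List.mem_iff_getElem.1 hv
    have hgd : la.getD k 0 = v := by
      rw [List.getD_eq_getElem?_getD, List.getElem?_eq_getElem hk]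
      simpa using he
    have hkm : (k : Int) < ((land.headD []).length : Int) := by
      rw [hlenA] at hk
      exact_mod_cast hk
    obtain ⟨w, -, -, hw⟩ := hcntA (k : Int) (by positivity) hkm
    rw [Int.toNat_natCast, hgd] at hw
    rw [hw]
    positivity
  rw [pvMaxD la hFne hFnn]
  rw [PySem.List.pyRange_zero_natCast (land.headD []).length, List.foldl_map]
  simp only [Int.toNat_natCast]
  rw [← hlenA, pvFoldRange la 0]
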